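-- pv_equiv track=rewrite | github.com/nikksabhishek/Code-vault | Random/Microsoft SE.py | arrange_elements
-- ===== SOURCE A (Python) =====
-- from collections import defaultdict
--
-- def arrange_elements(input_array):
--     try:
--         # if string_check(input_array):
--         #     return 'Expected input : Integers'
--         if input_array:
--             freq_dict = {}
--             for element in input_array:
--                 if element not in freq_dict.keys():
--                     freq_dict[element] = 1
--                 else:
--                     freq_dict[element] += 1
--
--             res = defaultdict(list)
--             for key, val in sorted(freq_dict.items()):
--                 res[val].append(key)
--
--             output_array = []
--             while res:
--                 key = max(res, key=int)
--                 if len(res[key]) > 1: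
--                     for item in res[key]:
--                         output_array.extend([item]*key)
--                 else:
--                     output_array.extend(res[key]*key)
--                 res.pop(key)
--             return output_array
--         else:
--             return 'Empty input array'
--     except Exception as e:
--         print ("Exception in arrange_elements function : "+str(e))
-- ===== SOURCE B (Python) =====
-- def arrange_elements(input_array):
--     try:
--         if input_array:
--             freq = {}
--             for element in input_array:
--                 freq[element] = freq.get(element, 0) + 1
--             order = sorted(freq.items(), key=lambda kv: (-kv[1], kv[0]))
--             output_array = []
--             for value, count in order:
--                 output_array.extend([value] * count)
--             return output_array
--         else:
--             return 'Empty input array'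
--     except Exception as e:
--         print("Exception in arrange_elements function : " + str(e))
-- ===== Notes on version B (the rewrite author's own statement) =====
-- stated objective: simpler
-- what changed: Replaced A's defaultdict bucketing-by-frequency plus the repeated max()/pop() extraction loop with one counting pass using dict.get and a single sort of the items by (-count, value), then one emit loop.
-- outside the precondition, e.g. on arrange_elements([]): A returns 'Empty input array', B returns 'Empty input array'
import Mathlib
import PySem

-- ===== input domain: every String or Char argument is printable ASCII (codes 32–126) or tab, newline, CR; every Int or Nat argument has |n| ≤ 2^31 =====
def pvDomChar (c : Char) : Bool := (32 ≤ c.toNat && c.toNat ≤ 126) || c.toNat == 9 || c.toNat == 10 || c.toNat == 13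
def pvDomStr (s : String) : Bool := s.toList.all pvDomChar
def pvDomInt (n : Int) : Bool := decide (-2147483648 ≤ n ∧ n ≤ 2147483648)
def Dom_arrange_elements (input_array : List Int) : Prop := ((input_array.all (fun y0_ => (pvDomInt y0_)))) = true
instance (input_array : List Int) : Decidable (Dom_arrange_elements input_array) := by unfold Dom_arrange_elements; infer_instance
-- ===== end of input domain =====

-- B replaces A's frequency-bucketing defaultdict and its repeated max()/pop() extraction loop by a
-- single sort of the counted items by (-count, value) followed by one emit loop (objective: simpler).
-- Equality is about the RETURN value; neither version mutates its argument.

-- ===== PORT A =====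
-- while res: … res.pop(key) — fuel = number of keys of res; each iteration removes one key
def pvLoopA : Nat → PySem.Dict Int (List Int) → List Int → List Int
  | 0, _, output_array => output_array
  | fuel + 1, res, output_array =>
    match PySem.List.max? res.keys (fun k => k) with   -- max(res, key=int); none exactly when res is empty ('while res:')
    | none => output_array
    | some key =>
      let bucket := res.getD key []
      let output_array :=
        if bucket.length > 1 then
          -- for item in res[key]: output_array.extend([item]*key)   ([x]*n = replicate; key ≥ 1 here, so toNat is exact)
          bucket.foldl (fun acc item => acc ++ List.replicate key.toNat item) output_array
        else
          -- output_array.extend(res[key]*key)   (list repetition; key ≥ 1, toNat exact)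
          output_array ++ (List.replicate key.toNat bucket).flatten
      pvLoopA fuel (res.erase key) output_array

def arrange_elements (input_array : List Int) : List Int :=
  if input_array = [] then []   -- Python returns the string 'Empty input array' here: excluded by Pre_
  else
    let freq_dict := input_array.foldl
      (fun d element => if d.contains element then d.modify element 0 (· + 1) else d.insert element 1)
      PySem.Dict.empty
    -- sorted(freq_dict.items()): tuple comparison = lexicographic on (key, val)
    let sortedItems := PySem.List.sorted2 freq_dict.items (fun kv => kv.1) (fun kv => kv.2) false
    -- res = defaultdict(list); res[val].append(key)
    let res := sortedItems.foldl (fun r kv => r.modify kv.2 [] (· ++ [kv.1])) PySem.Dict.empty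
    pvLoopA res.size res []

-- ===== PORT B =====
def arrange_elements_alt (input_array : List Int) : List Int :=
  if input_array = [] then []   -- Python returns the string 'Empty input array' here: excluded by Pre_
  else
    let freq := input_array.foldl (fun d element => d.insert element (d.getD element 0 + 1)) PySem.Dict.empty
    -- sorted(freq.items(), key=lambda kv: (-kv[1], kv[0]))
    let order := PySem.List.sorted2 freq.items (fun kv => -kv.2) (fun kv => kv.1) false
    -- for value, count in order: output_array.extend([value]*count)   (count ≥ 1, toNat exact)
    order.foldl (fun acc kv => acc ++ List.replicate kv.2.toNat kv.1) []

-- ===== PRECONDITION & SPEC =====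
-- Pre_ excludes only the empty list, on which A returns the string 'Empty input array' — not a value of type List Int.
def Pre_arrange_elements (input_array : List Int) : Prop := input_array ≠ []
instance (input_array : List Int) : Decidable (Pre_arrange_elements input_array) := by unfold Pre_arrange_elements; infer_instance
def pvWitness_arrange_elements : List Int := [3, 1, 2, 1, 3, 3]

def Spec_arrange_elements (input_array : List Int) (out : List Int) : Prop := out = arrange_elements_alt input_array
instance (input_array : List Int) (out : List Int) : Decidable (Spec_arrange_elements input_array out) := by unfold Spec_arrange_elements; infer_instance

-- ===== CLAIM (what is proved, stated in full; the proofs are below) =====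
def Claim_equal_arrange_elements : Prop := ∀ (input_array : List Int), Dom_arrange_elements input_array → Pre_arrange_elements input_array → Spec_arrange_elements input_array (arrange_elements input_array)

-- ===== LEMMAS AND PROOFS =====

def pvLexLT {α κ₁ κ₂ : Type} [LinearOrder κ₁] [LinearOrder κ₂] (k1 : α → κ₁) (k2 : α → κ₂) (a b : α) : Prop :=
  k1 a < k1 b ∨ (k1 a = k1 b ∧ k2 a < k2 b)

def pvLexLE {α κ₁ κ₂ : Type} [LinearOrder κ₁] [LinearOrder κ₂] (k1 : α → κ₁) (k2 : α → κ₂) (a b : α) : Prop :=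
  k1 a < k1 b ∨ (k1 a = k1 b ∧ k2 a ≤ k2 b)

theorem pvLexLE_trans {α κ₁ κ₂ : Type} [LinearOrder κ₁] [LinearOrder κ₂] {k1 : α → κ₁} {k2 : α → κ₂}
    {a b c : α} (h1 : pvLexLE k1 k2 a b) (h2 : pvLexLE k1 k2 b c) : pvLexLE k1 k2 a c := by
  unfold pvLexLE at *
  rcases h1 with h1 | ⟨e1, l1⟩ <;> rcases h2 with h2 | ⟨e2, l2⟩
  · exact Or.inl (lt_trans h1 h2)
  · exact Or.inl (e2 ▸ h1)
  · exact Or.inl (e1 ▸ h2)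
  · exact Or.inr ⟨e1.trans e2, le_trans l1 l2⟩

theorem pvBefore_true {α κ₁ κ₂ : Type} [LinearOrder κ₁] [LinearOrder κ₂] {k1 : α → κ₁} {k2 : α → κ₂}
    {a b : α} (h : (decide (k1 a < k1 b) || (!decide (k1 b < k1 a) && decide (k2 a < k2 b))) = true) :
    pvLexLE k1 k2 a b := by
  unfold pvLexLE
  rcases Bool.or_eq_true_iff.mp h with h | h
  · exact Or.inl (of_decide_eq_true h)
  · rcases Bool.and_eq_true_iff.mp h with ⟨h1, h2⟩
    rcases lt_trichotomy (k1 a) (k1 b) with h3 | h3 | h3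
    · exact Or.inl h3
    · exact Or.inr ⟨h3, le_of_lt (of_decide_eq_true h2)⟩
    · simp [h3] at h1

theorem pvBefore_false {α κ₁ κ₂ : Type} [LinearOrder κ₁] [LinearOrder κ₂] {k1 : α → κ₁} {k2 : α → κ₂}
    {a b : α} (h : (decide (k1 a < k1 b) || (!decide (k1 b < k1 a) && decide (k2 a < k2 b))) = false) :
    pvLexLE k1 k2 b a := by
  unfold pvLexLE
  rcases Bool.or_eq_false_iff.mp h with ⟨h1, h2⟩
  have h1' : ¬ k1 a < k1 b := of_decide_eq_false h1
  rcases Bool.and_eq_false_iff.mp h2 with h2 | h2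
  · have : k1 b < k1 a := of_decide_eq_true (by simpa using h2)
    exact Or.inl this
  · have h2' : ¬ k2 a < k2 b := of_decide_eq_false (by simpa using h2)
    rcases lt_trichotomy (k1 a) (k1 b) with h3 | h3 | h3
    · exact absurd h3 h1'
    · exact Or.inr ⟨h3.symm, le_of_not_gt h2'⟩
    · exact Or.inl h3

theorem pvInsertBy_pairwise_lex {α κ₁ κ₂ : Type} [LinearOrder κ₁] [LinearOrder κ₂] (k1 : α → κ₁) (k2 : α → κ₂)
    (x : α) (ys : List α) (h : ys.Pairwise (pvLexLE k1 k2)) :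
    (PySem.List.insertBy (fun a b => decide (k1 a < k1 b) || (!decide (k1 b < k1 a) && decide (k2 a < k2 b))) x ys).Pairwise (pvLexLE k1 k2) := by
  induction ys with
  | nil => simp [PySem.List.insertBy]
  | cons y ys ih =>
    rw [PySem.List.insertBy.eq_2]
    rcases hb : (decide (k1 x < k1 y) || (!decide (k1 y < k1 x) && decide (k2 x < k2 y))) with _ | _
    · rw [if_neg (by simp)]
      rcases List.pairwise_cons.mp h with ⟨hy, hys⟩
      refine List.pairwise_cons.mpr ⟨?_, ih hys⟩
      intro z hz
      rcases (PySem.List.mem_insertBy _ _ _ _).mp hz with rfl | hz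
      · exact pvBefore_false hb
      · exact hy z hz
    · rw [if_pos rfl]
      refine List.pairwise_cons.mpr ⟨?_, h⟩
      intro z hz
      rcases List.mem_cons.mp hz with rfl | hz
      · exact pvBefore_true hb
      · exact pvLexLE_trans (pvBefore_true hb) ((List.pairwise_cons.mp h).1 z hz)

theorem pvSorted2_pairwise {α κ₁ κ₂ : Type} [LinearOrder κ₁] [LinearOrder κ₂] (xs : List α) (k1 : α → κ₁) (k2 : α → κ₂) :
    (PySem.List.sorted2 xs k1 k2 false).Pairwise (pvLexLE k1 k2) := by
  show (List.foldl _ [] xs).Pairwise _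
  suffices h : ∀ (acc : List α), acc.Pairwise (pvLexLE k1 k2) →
      (List.foldl (fun acc x => PySem.List.insertBy (fun a b => decide (k1 a < k1 b) || (!decide (k1 b < k1 a) && decide (k2 a < k2 b))) x acc) acc xs).Pairwise (pvLexLE k1 k2) by
    exact h [] (by simp)
  induction xs with
  | nil => intro acc hacc; exact hacc
  | cons x xs ih => intro acc hacc; exact ih _ (pvInsertBy_pairwise_lex k1 k2 x acc hacc)

theorem pvSorted2_perm {α κ₁ κ₂ : Type} [LinearOrder κ₁] [LinearOrder κ₂] (xs : List α) (k1 : α → κ₁) (k2 : α → κ₂) :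
    (PySem.List.sorted2 xs k1 k2 false).Perm xs := PySem.List.sorted2_perm xs k1 k2 false

theorem pvSorted2_eq_of_perm_of_pairwise_lexlt {α κ₁ κ₂ : Type} [LinearOrder κ₁] [LinearOrder κ₂]
    (xs ys : List α) (k1 : α → κ₁) (k2 : α → κ₂)
    (hperm : ys.Perm xs) (hys : ys.Pairwise (pvLexLT k1 k2)) :
    PySem.List.sorted2 xs k1 k2 false = ys := by
  have hzp : (PySem.List.sorted2 xs k1 k2 false).Perm ys := (pvSorted2_perm xs k1 k2).trans hperm.symm
  -- distinctness of the lex key transfers along the permutations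
  have hD : ys.Pairwise (fun a b => ¬ (k1 a = k1 b ∧ k2 a = k2 b)) := by
    refine hys.imp ?_
    rintro a b (h | ⟨e, h⟩) ⟨e1, e2⟩
    · exact absurd (e1 ▸ h) (lt_irrefl _)
    · exact absurd (e2 ▸ h) (lt_irrefl _)
  have hDz : (PySem.List.sorted2 xs k1 k2 false).Pairwise (fun a b => ¬ (k1 a = k1 b ∧ k2 a = k2 b)) := by
    refine (List.Perm.pairwise_iff ?_ hzp).mpr hD
    intro a b h ⟨e1, e2⟩; exact h ⟨e1.symm, e2.symm⟩
  have hzlt : (PySem.List.sorted2 xs k1 k2 false).Pairwise (pvLexLT k1 k2) := by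
    refine ((pvSorted2_pairwise xs k1 k2).and hDz).imp ?_
    rintro a b ⟨(h | ⟨e, h⟩), hne⟩
    · exact Or.inl h
    · exact Or.inr ⟨e, lt_of_le_of_ne h (fun hh => hne ⟨e, hh⟩)⟩
  -- uniqueness of a strictly lex-sorted permutation
  have : ∀ (l₁ l₂ : List α), l₁.Perm l₂ → l₁.Pairwise (pvLexLT k1 k2) → l₂.Pairwise (pvLexLT k1 k2) → l₁ = l₂ := by
    intro l₁ l₂ hp h1 h2
    refine List.Perm.eq_of_pairwise (le := fun a b => pvLexLT k1 k2 a b ∨ a = b) ?_ (h1.imp Or.inl) (h2.imp Or.inl) hp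
    rintro a b _ _ (h | rfl) (h' | e) <;> try rfl
    · rcases h with h | ⟨e, h⟩ <;> rcases h' with h' | ⟨e', h'⟩
      · exact absurd (lt_trans h h') (lt_irrefl _)
      · exact absurd (e' ▸ h) (lt_irrefl _)
      · exact absurd (e ▸ h') (lt_irrefl _)
      · exact absurd (lt_trans h h') (lt_irrefl _)
    · exact e.symm
  exact this _ _ hzp hzlt hys

theorem pvFlatten_replicate_short (n : Nat) (b : List Int) (h : b.length ≤ 1) :
    (List.replicate n b).flatten = b.flatMap (fun k => List.replicate n k) := by
  cases b with
  | nil => simp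
  | cons x t =>
    cases t with
    | nil => simp
    | cons y s => simp at h

theorem pvAssoc_perm (l : List (Int × List Int)) (m : Int) (b : List Int)
    (hnd : (l.map Prod.fst).Nodup) (hmem : (m, b) ∈ l) :
    l.Perm ((m, b) :: l.filter (fun p => !(p.1 == m))) := by
  induction l with
  | nil => simp at hmem
  | cons p l ih =>
    simp only [List.map_cons, List.nodup_cons] at hnd
    rcases List.mem_cons.mp hmem with rfl | hmem
    · have hall : ∀ q ∈ l, (!(q.1 == m)) = true := by
        intro q hq
        have : q.1 ≠ m := fun h => hnd.1 (h ▸ List.mem_map.mpr ⟨q, hq, rfl⟩)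
        simp [this]
      rw [List.filter_cons, if_neg (by simp), List.filter_eq_self.mpr hall]
    · have hp : p.1 ≠ m := fun h => hnd.1 (h ▸ List.mem_map.mpr ⟨(m, b), hmem, rfl⟩)
      rw [List.filter_cons, if_pos (by simp [hp])]
      exact ((ih hnd.2 hmem).cons p).trans (List.Perm.swap _ _ _)

theorem pvMem_items_of_mem_keys (d : PySem.Dict Int (List Int)) (m : Int) (hm : m ∈ d.keys) :
    (m, d.getD m []) ∈ d.items := by
  have hex : ∃ p ∈ d.items, ((p.1 == m) = true) := by
    rcases List.mem_map.mp hm with ⟨p, hp, rfl⟩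
    exact ⟨p, hp, by simp⟩
  have hsome : (List.find? (fun p => p.1 == m) d.items).isSome := List.find?_isSome.mpr hex
  rcases Option.isSome_iff_exists.mp hsome with ⟨p, hfind⟩
  have hpm : (p.1 == m) = true := List.find?_some (p := fun q : Int × List Int => q.1 == m) hfind
  have hgd : d.getD m [] = p.2 := by simp [PySem.Dict.getD, PySem.Dict.get?, hfind]
  have hpe : (m, p.2) = p := by
    obtain ⟨p1, p2⟩ := p
    have : p1 = m := eq_of_beq hpm
    subst this; rfl
  rw [hgd, hpe]
  exact List.mem_of_find?_eq_some (p := fun q : Int × List Int => q.1 == m) hfind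

theorem pvErase_items (d : PySem.Dict Int (List Int)) (m : Int) :
    (d.erase m).items = d.items.filter (fun p => !(p.1 == m)) := rfl

theorem pvLoopA_eq (n : Nat) : ∀ (res : PySem.Dict Int (List Int)) (out : List Int),
    res.keys.Nodup → res.size = n →
    pvLoopA n res out = out ++ (PySem.List.sorted res.items (fun p => p.1) true).flatMap
      (fun p => p.2.flatMap (fun k => List.replicate p.1.toNat k)) := by
  induction n with
  | zero =>
    intro res out hnd hsz
    have hitems : res.items = [] := List.length_eq_zero_iff.mp hsz
    simp [pvLoopA, hitems, PySem.List.sorted]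
  | succ n ih =>
    intro res out hnd hsz
    rcases hmax : PySem.List.max? res.keys (fun k => k) with _ | m
    · exfalso
      rw [PySem.List.max?_eq_none_iff] at hmax
      have h0 : res.items = [] := by
        have h := congrArg List.length hmax
        simp only [PySem.Dict.keys, List.length_map, List.length_nil] at h
        exact List.length_eq_zero_iff.mp h
      have : res.size = 0 := by simp [PySem.Dict.size, h0]
      omega
    · have hmk : m ∈ res.keys := PySem.List.max?_mem hmax
      set b := res.getD m [] with hb
      have hmem : (m, b) ∈ res.items := pvMem_items_of_mem_keys res m hmk
      have hperm : res.items.Perm ((m, b) :: (res.erase m).items) := by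
        rw [pvErase_items]; exact pvAssoc_perm res.items m b hnd hmem
      have hsub : (res.erase m).items.Sublist res.items := by
        rw [pvErase_items]; exact List.filter_sublist
      have hndE : (res.erase m).keys.Nodup := hnd.sublist (hsub.map Prod.fst)
      have hszE : (res.erase m).size = n := by
        have hl := hperm.length_eq
        simp only [List.length_cons] at hl
        have hsz' : res.items.length = n + 1 := hsz
        show (res.erase m).items.length = n
        omega
      have hlt : ∀ y ∈ (res.erase m).items, y.1 < m := by
        intro y hy
        rw [pvErase_items] at hy
        have hy2 := List.of_mem_filter hy
        have hy1 : y ∈ res.items := List.mem_of_mem_filter hy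
        have hle : y.1 ≤ m := PySem.List.max?_isMax hmax y.1 (List.mem_map.mpr ⟨y, hy1, rfl⟩)
        have hne : y.1 ≠ m := by simpa using hy2
        exact lt_of_le_of_ne hle hne
      have hsorted : PySem.List.sorted res.items (fun p => p.1) true
          = (m, b) :: PySem.List.sorted (res.erase m).items (fun p => p.1) true := by
        apply PySem.List.sorted_rev_eq_of_perm_of_pairwise_gt
        · exact (List.Perm.cons _ (PySem.List.sorted_perm _ _ _)).trans hperm.symm
        · refine List.pairwise_cons.mpr ⟨?_, ?_⟩
          · intro y hy
            exact hlt y ((PySem.List.mem_sorted _ _ _ _).mp hy)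
          · have hple : (PySem.List.sorted (res.erase m).items (fun p => p.1) true).Pairwise
                (fun a b => b.1 ≤ a.1) := PySem.List.sorted_pairwise_rev _ _
            have hpne : (PySem.List.sorted (res.erase m).items (fun p => p.1) true).Pairwise
                (fun a b => a.1 ≠ b.1) := by
              have h1 : ((res.erase m).items).Pairwise (fun a b => a.1 ≠ b.1) :=
                List.pairwise_map.mp hndE
              refine (List.Perm.pairwise_iff ?_ (PySem.List.sorted_perm _ _ _)).mpr h1
              intro a b h e
              exact h e.symm
            exact (hple.and hpne).imp (fun h => lt_of_le_of_ne h.1 (Ne.symm h.2))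
      have hstep : pvLoopA (n + 1) res out
          = pvLoopA n (res.erase m) (out ++ b.flatMap (fun k => List.replicate m.toNat k)) := by
        rw [pvLoopA]
        simp only [hmax]
        by_cases hlen : b.length > 1
        · rw [if_pos (by rw [← hb]; exact hlen), ← hb, PySem.List.foldl_append_eq_flatMap]
        · rw [if_neg (by rw [← hb]; exact hlen), ← hb]
          congr 2
          exact pvFlatten_replicate_short m.toNat b (by omega)
      rw [hstep, ih _ _ hndE hszE, hsorted]
      simp [List.flatMap_cons, List.append_assoc]

-- abbreviations for the common intermediate values (proof-side only)
def pvKItems (input_array : List Int) : List (Int × Int) :=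
  (PySem.List.sorted (PySem.Set.ofList input_array) (fun k => k) false).map
    (fun k => (k, (input_array.count k : Int)))

def pvRes (input_array : List Int) : PySem.Dict Int (List Int) :=
  (pvKItems input_array).foldl (fun r kv => r.modify kv.2 [] (· ++ [kv.1])) PySem.Dict.empty

def pvVdesc (input_array : List Int) : List Int :=
  PySem.List.sorted (pvRes input_array).keys (fun v => v) true

-- the two counting loops build the same dict, namely Counter(input_array)
theorem pvFreq_eq_counter (input_array : List Int) :
    input_array.foldl
      (fun d element => if d.contains element then d.modify element 0 (· + 1) else d.insert element 1)
      PySem.Dict.empty = PySem.Dict.counter input_array := by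
  rw [← PySem.Dict.foldl_insert_getD_add_one_eq_counter]
  congr 1
  funext d e
  by_cases h : d.contains e = true
  · simp only [h, if_pos]
    rfl
  · have h' : d.contains e = false := by simpa using h
    have hg : d.get? e = none := (PySem.Dict.get?_eq_none_iff_contains d e).mpr h'
    simp only [h', Bool.false_eq_true, reduceIte]
    simp [PySem.Dict.getD, hg]

-- KItems is a permutation of Counter(input).items with strictly increasing keys
theorem pvKItems_perm (input_array : List Int) :
    (pvKItems input_array).Perm (PySem.Dict.counter input_array).items := by
  rw [PySem.Dict.items_counter]
  exact (PySem.List.sorted_perm _ _ _).map _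

theorem pvKItems_pairwise (input_array : List Int) :
    (pvKItems input_array).Pairwise (fun a b => a.1 < b.1) := by
  exact List.pairwise_map.mpr (PySem.List.sorted_ofList_pairwise_lt input_array)

-- A's sorted(freq_dict.items()) is exactly KItems
theorem pvSortedItems_eq (input_array : List Int) :
    PySem.List.sorted2 (PySem.Dict.counter input_array).items (fun kv => kv.1) (fun kv => kv.2) false
      = pvKItems input_array := by
  apply pvSorted2_eq_of_perm_of_pairwise_lexlt
  · exact pvKItems_perm input_array
  · exact (pvKItems_pairwise input_array).imp Or.inl

-- res's keys and buckets
theorem pvRes_keys (input_array : List Int) :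
    (pvRes input_array).keys = PySem.Set.ofList ((pvKItems input_array).map (fun kv => kv.2)) := by
  unfold pvRes
  rw [PySem.Dict.keys_foldl_modify_key]
  rfl

theorem pvRes_keys_nodup (input_array : List Int) : (pvRes input_array).keys.Nodup := by
  rw [pvRes_keys]; exact PySem.Set.nodup_ofList _

theorem pvRes_getD (input_array : List Int) (v : Int) :
    (pvRes input_array).getD v []
      = ((pvKItems input_array).filter (fun kv => kv.2 == v)).map (fun kv => kv.1) := by
  unfold pvRes
  have hswap : (pvKItems input_array).foldl (fun r kv => r.modify kv.2 [] (· ++ [kv.1])) PySem.Dict.empty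
      = ((pvKItems input_array).map Prod.swap).foldl
          (fun d p => d.modify p.1 [] (· ++ [p.2])) PySem.Dict.empty := by
    rw [List.foldl_map]
    rfl
  rw [hswap, PySem.Dict.getD_foldl_modify_append]
  simp [List.filter_map, List.map_map, Function.comp_def, Prod.swap]

-- the fiber decomposition is a permutation of the whole list
theorem pvFiber_perm (V : List Int) : ∀ (l : List (Int × Int)), V.Nodup →
    (∀ kv ∈ l, kv.2 ∈ V) →
    (V.flatMap (fun v => l.filter (fun kv => kv.2 == v))).Perm l := by
  induction V with
  | nil => intro l _ h; cases l with
    | nil => simp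
    | cons kv l => exact absurd (h kv (by simp)) (by simp)
  | cons v V ih =>
    intro l hnd h
    rw [List.flatMap_cons]
    have hrest : ∀ w ∈ V, l.filter (fun kv => kv.2 == w)
        = (l.filter (fun kv => !(kv.2 == v))).filter (fun kv => kv.2 == w) := by
      intro w hw
      rw [List.filter_filter]
      apply List.filter_congr
      intro kv _
      rcases hkv : (kv.2 == w) with _ | _
      · simp
      · have : kv.2 = w := by simpa using hkv
        have hvw : v ≠ w := fun e => (List.nodup_cons.mp hnd).1 (e ▸ hw)
        have hwv : w ≠ v := fun e => hvw e.symm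
        simp [this, hwv]
    have hVmap : V.flatMap (fun w => l.filter (fun kv => kv.2 == w))
        = V.flatMap (fun w => (l.filter (fun kv => !(kv.2 == v))).filter (fun kv => kv.2 == w)) := by
      rw [List.flatMap_def, List.flatMap_def]
      congr 1
      exact List.map_congr_left hrest
    rw [hVmap]
    have hperm2 := ih (l.filter (fun kv => !(kv.2 == v))) (List.nodup_cons.mp hnd).2 ?_
    · exact (hperm2.append_left (l.filter (fun kv => kv.2 == v))).trans
        (List.filter_append_perm _ l)
    · intro kv hkv
      have h1 : kv ∈ l := List.mem_of_mem_filter hkv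
      have h2 : kv.2 ≠ v := by simpa using List.of_mem_filter hkv
      rcases h kv h1 with h3
      rcases List.mem_cons.mp h3 with h4 | h4
      · exact absurd h4 h2
      · exact h4

theorem pvVdesc_pairwise (input_array : List Int) :
    (pvVdesc input_array).Pairwise (fun a b => b < a) := by
  have hle : (pvVdesc input_array).Pairwise (fun a b => b ≤ a) :=
    PySem.List.sorted_pairwise_rev _ _
  have hnd : (pvVdesc input_array).Nodup :=
    (pvRes_keys_nodup input_array).perm (PySem.List.sorted_perm _ _ _).symm
  exact (hle.and hnd).imp (fun h => lt_of_le_of_ne h.1 (Ne.symm h.2))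

theorem pvVdesc_complete (input_array : List Int) (kv : Int × Int) (h : kv ∈ pvKItems input_array) :
    kv.2 ∈ pvVdesc input_array := by
  unfold pvVdesc
  rw [PySem.List.mem_sorted, pvRes_keys, PySem.Set.mem_ofList]
  exact List.mem_map.mpr ⟨kv, h, rfl⟩

-- B's single sort is the fiber decomposition of KItems along Vdesc
theorem pvOrder_eq (input_array : List Int) :
    PySem.List.sorted2 (PySem.Dict.counter input_array).items (fun kv => -kv.2) (fun kv => kv.1) false
      = (pvVdesc input_array).flatMap (fun v => (pvKItems input_array).filter (fun kv => kv.2 == v)) := by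
  apply pvSorted2_eq_of_perm_of_pairwise_lexlt
  · refine (pvFiber_perm _ _ ?_ ?_).trans (pvKItems_perm input_array)
    · exact (pvRes_keys_nodup input_array).perm (PySem.List.sorted_perm _ _ _).symm
    · exact pvVdesc_complete input_array
  · rw [List.pairwise_flatMap]
    constructor
    · intro v _
      have h1 : ((pvKItems input_array).filter (fun kv => kv.2 == v)).Pairwise
          (fun a b => a.1 < b.1) := (pvKItems_pairwise input_array).filter _
      refine h1.imp_of_mem ?_
      intro a b ha hb hab
      have h2 : a.2 = v := by simpa using List.of_mem_filter ha
      have h3 : b.2 = v := by simpa using List.of_mem_filter hb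
      exact Or.inr ⟨by simp [h2, h3], hab⟩
    · refine (pvVdesc_pairwise input_array).imp ?_
      intro v w hvw a ha b hb
      have h2 : a.2 = v := by simpa using List.of_mem_filter ha
      have h3 : b.2 = w := by simpa using List.of_mem_filter hb
      exact Or.inl (by simp only [h2, h3]; omega)

-- sorting res's items by key, descending, lists the fibers in Vdesc order
theorem pvSorted_res_items (input_array : List Int) :
    PySem.List.sorted (pvRes input_array).items (fun p => p.1) true
      = (pvVdesc input_array).map (fun v => (v, (pvRes input_array).getD v [])) := by
  apply PySem.List.sorted_rev_eq_of_perm_of_pairwise_gt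
  · have hitems : (pvRes input_array).items
        = (pvRes input_array).keys.map (fun k => (k, (pvRes input_array).getD k [])) :=
      PySem.Dict.items_eq_map_keys _ (pvRes_keys_nodup input_array) []
    rw [hitems]
    exact (PySem.List.sorted_perm _ _ _).map _
  · exact List.pairwise_map.mpr ((pvVdesc_pairwise input_array).imp (fun h => h))

theorem pvBucket_flatMap (input_array : List Int) (v : Int) :
    ((pvRes input_array).getD v []).flatMap (fun k => List.replicate v.toNat k)
      = ((pvKItems input_array).filter (fun kv => kv.2 == v)).flatMap
          (fun kv => List.replicate kv.2.toNat kv.1) := by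
  rw [pvRes_getD, List.flatMap_def, List.flatMap_def, List.map_map]
  congr 1
  apply List.map_congr_left
  intro kv hkv
  have h2 : kv.2 = v := by simpa using List.of_mem_filter hkv
  simp [h2]

-- the two programs, each reduced to the same canonical form
theorem pvA_canonical (input_array : List Int) (h : input_array ≠ []) :
    arrange_elements input_array
      = (pvVdesc input_array).flatMap
          (fun v => ((pvRes input_array).getD v []).flatMap (fun k => List.replicate v.toNat k)) := by
  unfold arrange_elements
  rw [if_neg h]
  show pvLoopA _ _ _ = _
  rw [pvFreq_eq_counter, pvSortedItems_eq]
  show pvLoopA (pvRes input_array).size (pvRes input_array) [] = _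
  rw [pvLoopA_eq (pvRes input_array).size (pvRes input_array) [] (pvRes_keys_nodup input_array) rfl]
  rw [pvSorted_res_items, List.nil_append, List.flatMap_map]

theorem pvB_canonical (input_array : List Int) (h : input_array ≠ []) :
    arrange_elements_alt input_array
      = (pvVdesc input_array).flatMap
          (fun v => ((pvRes input_array).getD v []).flatMap (fun k => List.replicate v.toNat k)) := by
  unfold arrange_elements_alt
  rw [if_neg h]
  show ((PySem.List.sorted2 _ _ _ false).foldl _ []) = _
  rw [PySem.Dict.foldl_insert_getD_add_one_eq_counter, pvOrder_eq,
    PySem.List.foldl_append_eq_flatMap, List.nil_append, List.flatMap_assoc]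
  exact List.flatMap_congr (fun v _ => (pvBucket_flatMap input_array v).symm)

-- ===== VERDICT (by name: the statement is the Claim_ definition above) =====
theorem arrange_elements_spec : Claim_equal_arrange_elements := by
  intro input_array _ hpre
  unfold Spec_arrange_elements
  rw [pvA_canonical input_array hpre, pvB_canonical input_array hpre]
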